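-- pv_equiv track=rewrite | github.com/sgagnonboncode/aoc2025 | day03.py | part_1_maximum_joltage
-- ===== SOURCE A (Python) =====
-- def part_1_maximum_joltage(cells: list[int]) -> int:
--     max_jolt = 0
--
--     for i in range(0, len(cells) - 1):
--         for j in range(i + 1, len(cells)):
--             jolt = cells[i] * 10 + cells[j]
--             if jolt > max_jolt:
--                 max_jolt = jolt
--     return max_jolt
-- ===== SOURCE B (Python) =====
-- def part_1_maximum_joltage(cells: list[int]) -> int:
--     # One right-to-left pass keeping the suffix maximum: best pair cells[i]*10+cells[j], i<j, floored at 0.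
--     best = 0
--     mx = None
--     for x in reversed(cells):
--         if mx is not None:
--             best = max(best, x * 10 + mx)
--             mx = max(mx, x)
--         else:
--             mx = x
--     return best
-- ===== Notes on version B (the rewrite author's own statement) =====
-- stated objective: faster
-- what changed: Replaced the nested scan over all index pairs (i,j), i<j, by a single right-to-left pass that maintains the suffix maximum and the best pair value with a 0 floor.
import Mathlib
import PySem

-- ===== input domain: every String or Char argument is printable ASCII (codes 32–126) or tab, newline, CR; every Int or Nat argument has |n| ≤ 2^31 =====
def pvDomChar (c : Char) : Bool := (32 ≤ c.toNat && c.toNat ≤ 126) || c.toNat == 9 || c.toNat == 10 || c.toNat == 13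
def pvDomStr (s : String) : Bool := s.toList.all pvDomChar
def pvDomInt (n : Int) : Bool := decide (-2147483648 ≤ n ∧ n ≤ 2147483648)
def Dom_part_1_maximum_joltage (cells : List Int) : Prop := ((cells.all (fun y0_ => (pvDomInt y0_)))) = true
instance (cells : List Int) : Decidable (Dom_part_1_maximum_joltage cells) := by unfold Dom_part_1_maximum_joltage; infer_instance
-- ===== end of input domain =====

-- B replaces A's quadratic scan over all index pairs by one right-to-left pass keeping the suffix maximum (faster: O(n) vs O(n^2)).

-- ===== PORT A =====
def part_1_maximum_joltage (cells : List Int) : Int :=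
  let n := PySem.List.len cells
  -- indices i, j produced by the ranges are always in bounds, so the getD default 0 is never used
  (PySem.List.pyRange 0 (n - 1)).foldl (fun max_jolt i =>
    (PySem.List.pyRange (i + 1) n).foldl (fun max_jolt j =>
      let jolt := PySem.List.pyGetD cells i 0 * 10 + PySem.List.pyGetD cells j 0
      if jolt > max_jolt then jolt else max_jolt) max_jolt) 0

-- ===== PORT B =====
-- state = (best, mx): best pair value so far (0 floor), mx = max of the suffix already seen (None before the first element)
def pvStepB (st : Int × Option Int) (x : Int) : Int × Option Int :=
  match st with
  | (best, none) => (best, some x)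
  | (best, some m) => (max best (x * 10 + m), some (max m x))

def part_1_maximum_joltage_alt (cells : List Int) : Int :=
  (cells.reverse.foldl pvStepB (0, none)).1

-- ===== PRECONDITION & SPEC =====
def Spec_part_1_maximum_joltage (cells : List Int) (out : Int) : Prop := out = part_1_maximum_joltage_alt cells
instance (cells : List Int) (out : Int) : Decidable (Spec_part_1_maximum_joltage cells out) := by unfold Spec_part_1_maximum_joltage; infer_instance

-- ===== CLAIM (what is proved, stated in full; the proofs are below) =====
def Claim_equal_part_1_maximum_joltage : Prop := ∀ (cells : List Int), Dom_part_1_maximum_joltage cells → Spec_part_1_maximum_joltage cells (part_1_maximum_joltage cells)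

-- ===== LEMMAS AND PROOFS =====

-- B's fold from the right, head-structural form
def pvS (xs : List Int) : Int × Option Int := xs.foldr (fun x s => pvStepB s x) (0, none)

theorem pvAlt_eq_pvS (cells : List Int) : part_1_maximum_joltage_alt cells = (pvS cells).1 := by
  simp [part_1_maximum_joltage_alt, pvS, List.foldl_reverse]

theorem pvS_cons (x : Int) (xs : List Int) : pvS (x :: xs) = pvStepB (pvS xs) x := rfl

theorem pvS_fst_nonneg (xs : List Int) : 0 ≤ (pvS xs).1 := by
  induction xs with
  | nil => simp [pvS]
  | cons x xs ih =>
    rw [pvS_cons]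
    rcases h : pvS xs with ⟨b, m⟩
    rw [h] at ih
    cases m with
    | none => exact ih
    | some m => exact le_max_of_le_left ih

-- A's inner loop over a suffix, as a list fold
def pvInner (v : Int) (acc : Int) (ys : List Int) : Int :=
  ys.foldl (fun mx y => if v * 10 + y > mx then v * 10 + y else mx) acc

theorem pvInner_char (ys : List Int) : ∀ (acc v : Int),
    pvInner v acc ys = match (pvS ys).2 with
      | none => acc
      | some m => max acc (v * 10 + m) := by
  induction ys with
  | nil => intro acc v; simp [pvInner, pvS]
  | cons y ys ih =>
    intro acc v
    have h1 : pvInner v acc (y :: ys)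
        = pvInner v (if v * 10 + y > acc then v * 10 + y else acc) ys := rfl
    have h2 : (if v * 10 + y > acc then v * 10 + y else acc) = max acc (v * 10 + y) := by
      split <;> omega
    rw [h1, h2, ih, pvS_cons]
    obtain ⟨b, m⟩ := pvS ys
    cases m with
    | none => simp [pvStepB]
    | some m =>
      simp only [pvStepB]
      rw [max_assoc, max_comm (v * 10 + y) (v * 10 + m), max_add_add_left]

-- A's outer loop, head-structural form (the last index of range(len) contributes nothing)
def pvSpecA : List Int → Int → Int
  | [], acc => acc
  | x :: xs, acc => pvSpecA xs (pvInner x acc xs)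

theorem pvSpecA_eq_pvS (xs : List Int) : ∀ acc : Int, 0 ≤ acc →
    pvSpecA xs acc = max acc (pvS xs).1 := by
  induction xs with
  | nil => intro acc h; simp [pvSpecA, pvS]; omega
  | cons x xs ih =>
    intro acc h
    have hin := pvInner_char xs acc x
    have hnn : 0 ≤ pvInner x acc xs := by
      rw [hin]; cases (pvS xs).2 with
      | none => exact h
      | some m => exact le_max_of_le_left h
    have : pvSpecA (x :: xs) acc = pvSpecA xs (pvInner x acc xs) := rfl
    rw [this, ih _ hnn, hin, pvS_cons]
    rcases hp : pvS xs with ⟨b, m⟩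
    cases m with
    | none => simp [pvStepB]
    | some m =>
      simp only [pvStepB]
      rw [max_assoc, max_comm (x * 10 + m) b]

-- the fold over range(len) with getD/drop equals pvSpecA
theorem pvRangeFold_eq_pvSpecA (cells : List Int) : ∀ acc : Int,
    (List.range cells.length).foldl
      (fun mx k => pvInner (cells.getD k 0) mx (cells.drop (k + 1))) acc
    = pvSpecA cells acc := by
  induction cells with
  | nil => intro acc; simp [pvSpecA]
  | cons x xs ih =>
    intro acc
    rw [List.length_cons, List.range_succ_eq_map]
    simp only [List.foldl_cons, List.foldl_map]
    have h0 : pvInner ((x :: xs).getD 0 0) acc ((x :: xs).drop (0 + 1)) = pvInner x acc xs := rfl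
    rw [h0]
    have hfun : (List.range xs.length).foldl
        (fun mx k => pvInner ((x :: xs).getD (Nat.succ k) 0) mx ((x :: xs).drop (Nat.succ k + 1)))
          (pvInner x acc xs)
        = (List.range xs.length).foldl
        (fun mx k => pvInner (xs.getD k 0) mx (xs.drop (k + 1))) (pvInner x acc xs) := by
      apply PySem.List.foldl_congr_mem
      intro mx k _
      rfl
    rw [hfun, ih]
    rfl

-- A's inner pyRange loop rewritten as pvInner on the dropped suffix
theorem pvInnerBridge (cells : List Int) (i : Int) (h : 0 ≤ i) (mx : Int) :
    (PySem.List.pyRange (i + 1) (PySem.List.len cells)).foldl (fun max_jolt j =>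
      let jolt := PySem.List.pyGetD cells i 0 * 10 + PySem.List.pyGetD cells j 0
      if jolt > max_jolt then jolt else max_jolt) mx
    = pvInner (PySem.List.pyGetD cells i 0) mx (cells.drop (i + 1).toNat) :=
  PySem.List.foldl_pyRange_pyGetD cells 0
    (fun acc y => if PySem.List.pyGetD cells i 0 * 10 + y > acc
                  then PySem.List.pyGetD cells i 0 * 10 + y else acc) mx (by omega)

theorem pvA_eq_rangeFold (cells : List Int) :
    part_1_maximum_joltage cells
    = (List.range cells.length).foldl
        (fun mx k => pvInner (cells.getD k 0) mx (cells.drop (k + 1))) 0 := by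
  cases cells with
  | nil => rfl
  | cons x xs =>
    show (PySem.List.pyRange 0 (PySem.List.len (x :: xs) - 1)).foldl _ 0 = _
    have hlen : PySem.List.len (x :: xs) = ((xs.length + 1 : Nat) : Int) := by
      simp [PySem.List.len]
    have hm1 : PySem.List.len (x :: xs) - 1 = ((xs.length : Nat) : Int) := by
      rw [hlen]; push_cast; ring
    rw [hm1, PySem.List.pyRange_zero_natCast, List.foldl_map]
    -- range(len) = range(len-1) ++ [len-1]; the last outer step is a fold over the empty suffix
    rw [List.length_cons, List.range_succ, List.foldl_append]
    simp only [List.foldl_cons, List.foldl_nil]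
    have hlast : ∀ mx : Int,
        pvInner ((x :: xs).getD xs.length 0) mx ((x :: xs).drop (xs.length + 1)) = mx := by
      intro mx
      rw [List.drop_eq_nil_of_le (by simp)]
      rfl
    rw [hlast]
    apply PySem.List.foldl_congr_mem
    intro mx k hk
    have hk' : (0:Int) ≤ (k : Int) := by positivity
    rw [pvInnerBridge (x :: xs) (k : Int) hk' mx]
    have h1 : PySem.List.pyGetD (x :: xs) (k : Int) 0 = (x :: xs).getD k 0 := by
      simp [PySem.List.pyGetD_natCast]
    have h2 : ((k : Int) + 1).toNat = k + 1 := by omega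
    rw [h1, h2]

-- ===== VERDICT (by name: the statement is the Claim_ definition above) =====
theorem part_1_maximum_joltage_spec : Claim_equal_part_1_maximum_joltage := by
  intro cells _
  unfold Spec_part_1_maximum_joltage
  rw [pvAlt_eq_pvS, pvA_eq_rangeFold, pvRangeFold_eq_pvSpecA,
     pvSpecA_eq_pvS cells 0 le_rfl]
  have := pvS_fst_nonneg cells
  omega
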